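-- pv_equiv track=rewrite | github.com/AndrioC/hacker-rank | 17-birthday_chocolate.py | birthday
-- ===== SOURCE A (Python) =====
-- def birthday(s, d, m):
-- 	size = len(s)
-- 	attempt_round = 0
-- 	sum_m = 0
-- 	num_m = 0
-- 	teste = []
--
--
-- 	if size == 1:
-- 		if s[0] == d:
-- 			num_m = m
-- 	else:
-- 		for y in range(size+1):
-- 			if (sum(s[y:m+y]) == d and (y - attempt_round == 1 or y - attempt_round == 0)):
-- 				num_m += 1
-- 				attempt_round = y
-- 			elif (sum(s[y:m+y]) == d and y - attempt_round > 1):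
-- 				num_m = 0
-- 				attempt_round = y
-- 			else:
-- 				attempt_round = y
--
-- 	return num_m
-- ===== SOURCE B (Python) =====
-- def birthday(s, d, m):
--     # Prefix sums: every window sum in O(1), one uniform rule for every list length
--     # (no special case for len(s) == 1; see the stated intended difference there).
--     n = len(s)
--     P = [0]
--     for v in s:
--         P.append(P[-1] + v)
--
--     def wsum(y):
--         # sum(s[y:m+y]) with Python slice normalisation, via the prefix table
--         stop = m + y
--         if stop < 0:
--             stop += n
--         stop = max(0, min(stop, n))
--         return P[stop] - P[y] if stop > y else 0
--
--     return sum(1 for y in range(n + 1) if wsum(y) == d)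
-- ===== Notes on version B (the rewrite author's own statement) =====
-- stated objective: faster
-- what changed: Replaces A's repeated sum(s[y:m+y]) slice summation (and its always-true bookkeeping around attempt_round, whose elif branch is dead) by a prefix-sum table giving each window sum in O(1), applied uniformly to every list length instead of A's special case for len(s)==1.
-- intended difference: On single-element lists where A's special branch misfires (s[0]==d with m not the count the windows give, or d==0 with s[0]!=d), A returns m or 0 from its 'if size==1' shortcut while B returns the actual number of window positions y in 0..1 whose (clamped) slice sums to d, which is the count the general loop itself would produce. — e.g. on birthday([5], 5, 3): A returns 3, B returns 1
import Mathlib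
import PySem

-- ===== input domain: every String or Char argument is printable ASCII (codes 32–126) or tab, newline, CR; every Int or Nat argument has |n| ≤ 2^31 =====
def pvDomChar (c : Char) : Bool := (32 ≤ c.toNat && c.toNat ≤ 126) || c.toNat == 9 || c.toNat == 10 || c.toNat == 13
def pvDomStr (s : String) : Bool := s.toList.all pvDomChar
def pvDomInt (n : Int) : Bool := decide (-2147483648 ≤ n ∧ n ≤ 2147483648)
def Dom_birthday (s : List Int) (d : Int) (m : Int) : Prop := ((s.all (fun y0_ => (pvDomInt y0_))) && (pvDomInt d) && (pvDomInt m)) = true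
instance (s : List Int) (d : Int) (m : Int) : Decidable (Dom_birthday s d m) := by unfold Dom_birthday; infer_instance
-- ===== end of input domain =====

-- B replaces A's repeated slice summations by a prefix-sum table (each window sum in O(1)),
-- applied uniformly to every list length; A's len(s)==1 special branch is a stated difference (D_ below).

-- ===== PORT A =====
-- loop body of A's for-loop; state = (attempt_round, num_m)  (the unused 'teste' list is dropped)
def pvStepA (s : List Int) (d m : Int) (st : Int × Int) (y : Int) : Int × Int :=
  if (PySem.List.slice s (some y) (some (m + y))).sum = d ∧ (y - st.1 = 1 ∨ y - st.1 = 0) then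
    (y, st.2 + 1)
  else if (PySem.List.slice s (some y) (some (m + y))).sum = d ∧ y - st.1 > 1 then
    (y, 0)
  else
    (y, st.2)

def birthday (s : List Int) (d : Int) (m : Int) : Int :=
  let size : Int := (s.length : Int)
  if size = 1 then
    -- s[0]: index 0 is always in range here since size == 1
    if PySem.List.pyGetD s 0 0 = d then m else 0
  else
    ((PySem.List.pyRange 0 (size + 1) 1).foldl (pvStepA s d m) (0, 0)).2

-- ===== PORT B =====
-- P = [0]; for v in s: P.append(P[-1] + v)
def pvPrefix (s : List Int) : List Int :=
  s.foldl (fun acc v => acc ++ [acc.getLastD 0 + v]) [0]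

-- wsum(y): indices into P are always in range (0 ≤ y ≤ n and 0 ≤ stop ≤ n after clamping)
def pvWsum (P : List Int) (n m : Int) (y : Int) : Int :=
  let stop0 := m + y
  let stop1 := if stop0 < 0 then stop0 + n else stop0
  let stop := max 0 (min stop1 n)
  if y < stop then PySem.List.pyGetD P stop 0 - PySem.List.pyGetD P y 0 else 0

def birthday_alt (s : List Int) (d : Int) (m : Int) : Int :=
  let n : Int := (s.length : Int)
  let P := pvPrefix s
  (PySem.List.pyRange 0 (n + 1) 1).foldl
    (fun c y => if pvWsum P n m y = d then c + 1 else c) 0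

-- ===== PRECONDITION & SPEC =====
-- On single-element lists where A's special branch misfires (s[0]==d with m not the count the
-- window positions give, or d==0 with s[0]!=d), A returns m (resp. 0) from its 'if size==1'
-- shortcut while B returns the actual number of window positions y in 0..1 whose (clamped) slice
-- sums to d — the count A's own general loop would produce there, which is the intended value.
def D_birthday (s : List Int) (d : Int) (m : Int) : Prop :=
  s.length = 1 ∧
    ((s.headI = d ∧ d = 0 ∧ m ≠ 2) ∨
     (s.headI = d ∧ d ≠ 0 ∧ m ≠ 0 ∧ m ≠ 1) ∨
     (s.headI ≠ d ∧ d = 0))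
instance (s : List Int) (d : Int) (m : Int) : Decidable (D_birthday s d m) := by
  unfold D_birthday; infer_instance

def Spec_birthday (s : List Int) (d : Int) (m : Int) (out : Int) : Prop :=
  ¬ D_birthday s d m → out = birthday_alt s d m
instance (s : List Int) (d : Int) (m : Int) (out : Int) : Decidable (Spec_birthday s d m out) := by
  unfold Spec_birthday; infer_instance

def pvDiffWitness_birthday : List Int × Int × Int := ([5], 5, 3)
def pvDiffWitnessOut_birthday : Int × Int := (3, 1)

-- ===== CLAIM (what is proved, stated in full; the proofs are below) =====
def Claim_unchanged_birthday : Prop := ∀ (s : List Int) (d : Int) (m : Int), Dom_birthday s d m → Spec_birthday s d m (birthday s d m)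
def Claim_changed_birthday : Prop := Dom_birthday (pvDiffWitness_birthday.1) (pvDiffWitness_birthday.2.1) (pvDiffWitness_birthday.2.2) ∧ D_birthday (pvDiffWitness_birthday.1) (pvDiffWitness_birthday.2.1) (pvDiffWitness_birthday.2.2) ∧ birthday (pvDiffWitness_birthday.1) (pvDiffWitness_birthday.2.1) (pvDiffWitness_birthday.2.2) = pvDiffWitnessOut_birthday.1 ∧ birthday_alt (pvDiffWitness_birthday.1) (pvDiffWitness_birthday.2.1) (pvDiffWitness_birthday.2.2) = pvDiffWitnessOut_birthday.2 ∧ pvDiffWitnessOut_birthday.1 ≠ pvDiffWitnessOut_birthday.2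
def Claim_exact_birthday : Prop := ∀ (s : List Int) (d : Int) (m : Int), Dom_birthday s d m → D_birthday s d m → birthday s d m ≠ birthday_alt s d m

-- ===== LEMMAS AND PROOFS =====

theorem pvPrefix_eq (s : List Int) :
    pvPrefix s = (List.range (s.length + 1)).map (fun i => ((s.take i).sum : Int)) := by
  induction s using List.reverseRecOn with
  | nil => simp [pvPrefix]
  | append_singleton t v ih =>
    have h1 : pvPrefix (t ++ [v]) = pvPrefix t ++ [(pvPrefix t).getLastD 0 + v] := by
      simp [pvPrefix, List.foldl_append]
    have hlast : (pvPrefix t).getLastD 0 = t.sum := by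
      rw [ih, List.range_succ, List.map_append]
      simp
    have hmap : (List.range (t.length + 1)).map (fun i => (((t ++ [v]).take i).sum : Int))
        = (List.range (t.length + 1)).map (fun i => ((t.take i).sum : Int)) := by
      apply List.map_congr_left
      intro i hi
      simp only [List.mem_range] at hi
      rw [List.take_append_of_le_length (by omega)]
    rw [h1, hlast, ih]
    have h2 : (t ++ [v]).length + 1 = (t.length + 1) + 1 := by simp
    conv_rhs => rw [h2, List.range_succ, List.map_append, hmap]
    simp

theorem pvPrefix_get (s : List Int) (i : Int) (h0 : 0 ≤ i) (h1 : i ≤ (s.length : Int)) :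
    PySem.List.pyGetD (pvPrefix s) i 0 = (s.take i.toNat).sum := by
  rw [pvPrefix_eq]
  rw [PySem.List.pyGetD_of_nonneg]
  rw [PySem.List.getD_map_range]
  · omega
  · exact h0

theorem pvWindow_eq (s : List Int) (m y : Int) (h0 : 0 ≤ y) (h1 : y ≤ (s.length : Int)) :
    (PySem.List.slice s (some y) (some (m + y))).sum
      = pvWsum (pvPrefix s) (s.length : Int) m y := by
  have hslice : PySem.List.slice s (some y) (some (m + y))
      = (s.drop (PySem.List.clampIdx s.length y)).take
          (PySem.List.clampIdx s.length (m + y) - PySem.List.clampIdx s.length y) := by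
    simp [PySem.List.slice]
  have hcy : PySem.List.clampIdx s.length y = y.toNat := by
    unfold PySem.List.clampIdx
    split_ifs <;> omega
  have hcstop : PySem.List.clampIdx s.length (m + y)
      = (max 0 (min (if m + y < 0 then m + y + (s.length : Int) else m + y) (s.length : Int))).toNat := by
    unfold PySem.List.clampIdx
    split_ifs <;> omega
  rw [hslice, hcy, hcstop]
  unfold pvWsum
  set st : Int := max 0 (min (if m + y < 0 then m + y + (s.length : Int) else m + y) (s.length : Int)) with hst
  have hst0 : 0 ≤ st := le_max_left _ _
  have hstn : st ≤ (s.length : Int) := by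
    rw [hst]; rcases le_total (if m + y < 0 then m + y + (s.length : Int) else m + y) (s.length : Int) with h | h
    · simp [min_eq_left h]; omega
    · simp [min_eq_right h]
  by_cases hcmp : y < st
  · rw [if_pos hcmp]
    rw [pvPrefix_get s st hst0 hstn, pvPrefix_get s y h0 h1]
    have htake : s.take st.toNat = s.take y.toNat ++ (s.drop y.toNat).take (st.toNat - y.toNat) := by
      rw [← List.take_add (l := s) (i := y.toNat) (j := st.toNat - y.toNat)]
      congr 1
      omega
    rw [htake, List.sum_append]
    ring
  · rw [if_neg hcmp]
    have : st.toNat - y.toNat = 0 := by omega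
    rw [this]
    simp

theorem pvLoopA (s : List Int) (d m : Int) : ∀ (k : Nat) (a ar num : Int),
    (ar = a ∨ ar + 1 = a) →
    (((PySem.List.pyRange a (a + k) 1).foldl (pvStepA s d m) (ar, num)).2
      = num + ((PySem.List.pyRange a (a + k) 1).countP
          (fun y => (PySem.List.slice s (some y) (some (m + y))).sum == d) : Int)) := by
  intro k
  induction k with
  | zero => intro a ar num _; rw [PySem.List.pyRange_one_eq_nil (by omega)]; simp
  | succ k ih =>
    intro a ar num har
    rw [PySem.List.pyRange_one_cons (by omega : a < a + (k + 1 : Nat))]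
    rw [List.foldl_cons, List.countP_cons]
    have hstep : pvStepA s d m (ar, num) a
        = (a, num + if (PySem.List.slice s (some a) (some (m + a))).sum = d then 1 else 0) := by
      unfold pvStepA
      by_cases hs : (PySem.List.slice s (some a) (some (m + a))).sum = d
      · rw [if_pos ⟨hs, by omega⟩, if_pos hs]
      · rw [if_neg (by tauto), if_neg (by tauto), if_neg hs]; simp
    rw [hstep]
    have harith : a + (k + 1 : Nat) = (a + 1) + (k : Nat) := by omega
    rw [harith]
    rw [ih (a + 1) a _ (Or.inr rfl)]
    by_cases hs : (PySem.List.slice s (some a) (some (m + a))).sum = d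
    · simp [hs]; ring
    · simp [hs]

theorem pvLoopB (P : List Int) (n m d : Int) (l : List Int) :
    (l.foldl (fun c y => if pvWsum P n m y = d then c + 1 else c) 0 : Int)
      = (l.countP (fun y => pvWsum P n m y == d) : Int) := by
  suffices h : ∀ c : Int, (l.foldl (fun c y => if pvWsum P n m y = d then c + 1 else c) c : Int)
      = c + (l.countP (fun y => pvWsum P n m y == d) : Int) by
    simpa using h 0
  induction l with
  | nil => intro c; simp
  | cons x t ih =>
    intro c
    rw [List.foldl_cons, List.countP_cons, ih]
    by_cases hx : pvWsum P n m x = d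
    · simp [hx]; ring
    · simp [hx]

theorem pvAltSingleton (x d m : Int) :
    birthday_alt [x] d m
      = (if (if 1 ≤ m then x else 0) = d then 1 else 0) + (if (0 : Int) = d then 1 else 0) := by
  have hP : pvPrefix [x] = [0, x] := by simp [pvPrefix]
  have hr : PySem.List.pyRange 0 ((([x] : List Int).length : Int) + 1) 1 = [0, 1] := by
    have : (([x] : List Int).length : Int) + 1 = 2 := by simp
    rw [this]; decide
  have hw0 : pvWsum [0, x] 1 m 0 = if 1 ≤ m then x else 0 := by
    simp only [pvWsum]
    by_cases hm : 1 ≤ m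
    · rw [show (max 0 (min (if m + 0 < 0 then m + 0 + 1 else m + 0) 1)) = 1 by
        split_ifs <;> omega]
      norm_num [PySem.List.pyGetD]
      omega
    · rw [show (max 0 (min (if m + 0 < 0 then m + 0 + 1 else m + 0) 1)) = 0 by
        split_ifs <;> omega]
      norm_num
      omega
  have hw1 : pvWsum [0, x] 1 m 1 = 0 := by
    simp only [pvWsum]
    rw [if_neg (by split_ifs <;> omega :
      ¬ (1 : Int) < max 0 (min (if m + 1 < 0 then m + 1 + 1 else m + 1) 1))]
  show (PySem.List.pyRange 0 ((([x] : List Int).length : Int) + 1) 1).foldl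
      (fun c y => if pvWsum (pvPrefix [x]) (([x] : List Int).length : Int) m y = d then c + 1 else c) 0 = _
  rw [hr, hP]
  simp only [List.foldl_cons, List.foldl_nil, List.length_cons, List.length_nil,
    Nat.cast_zero, zero_add, Nat.cast_succ]
  norm_num [hw0, hw1]
  split_ifs <;> norm_num

theorem pvASingleton (x d m : Int) : birthday [x] d m = if x = d then m else 0 := by
  unfold birthday
  rw [if_pos (by simp : ((([x] : List Int).length : Int)) = 1)]
  norm_num [PySem.List.pyGetD]

theorem pvA_eq_count (s : List Int) (d m : Int) (h : s.length ≠ 1) :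
    birthday s d m = ((PySem.List.pyRange 0 ((s.length : Int) + 1) 1).countP
      (fun y => (PySem.List.slice s (some y) (some (m + y))).sum == d) : Int) := by
  unfold birthday
  rw [if_neg (by exact_mod_cast h)]
  have h2 : (0 : Int) + ((s.length + 1 : Nat) : Int) = (s.length : Int) + 1 := by push_cast; ring
  have := pvLoopA s d m (s.length + 1) 0 0 0 (Or.inl rfl)
  rw [h2] at this
  rw [this]
  ring

theorem pvB_eq_count (s : List Int) (d m : Int) :
    birthday_alt s d m = ((PySem.List.pyRange 0 ((s.length : Int) + 1) 1).countP
      (fun y => pvWsum (pvPrefix s) (s.length : Int) m y == d) : Int) := by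
  unfold birthday_alt
  exact pvLoopB (pvPrefix s) (s.length : Int) m d _

theorem pvCount_eq (s : List Int) (d m : Int) :
    ((PySem.List.pyRange 0 ((s.length : Int) + 1) 1).countP
      (fun y => (PySem.List.slice s (some y) (some (m + y))).sum == d))
    = ((PySem.List.pyRange 0 ((s.length : Int) + 1) 1).countP
      (fun y => pvWsum (pvPrefix s) (s.length : Int) m y == d)) := by
  apply List.countP_congr
  intro y hy
  rw [PySem.List.mem_pyRange_one] at hy
  rw [pvWindow_eq s m y (by omega) (by omega)]

theorem pv_main (s : List Int) (d m : Int) (hD : ¬ D_birthday s d m) :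
    birthday s d m = birthday_alt s d m := by
  by_cases h1 : s.length = 1
  · obtain ⟨x, rfl⟩ := List.length_eq_one_iff.mp h1
    rw [pvASingleton, pvAltSingleton]
    simp only [D_birthday, List.headI, List.length_cons, List.length_nil] at hD
    push Not at hD
    have hD' := hD trivial
    split_ifs <;> omega
  · rw [pvA_eq_count s d m h1, pvB_eq_count, pvCount_eq]

theorem pv_exact (s : List Int) (d m : Int) (hD : D_birthday s d m) :
    birthday s d m ≠ birthday_alt s d m := by
  obtain ⟨x, rfl⟩ := List.length_eq_one_iff.mp hD.1
  rw [pvASingleton, pvAltSingleton]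
  simp only [D_birthday, List.headI, List.length_cons, List.length_nil] at hD
  obtain ⟨-, hD⟩ := hD
  split_ifs <;> omega

-- ===== VERDICT (by name: the statement is the Claim_ definition above) =====
theorem birthday_spec : Claim_unchanged_birthday := by
  intro s d m _ hD
  exact pv_main s d m hD
theorem birthday_changed : Claim_changed_birthday := by unfold Claim_changed_birthday; decide
theorem birthday_tight : Claim_exact_birthday := by
  intro s d m _ hD
  exact pv_exact s d m hD
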